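-- pv_equiv track=rewrite | github.com/Cbhanu05/prochemy | ml-service/ml-service/services/classifier.py | is_code_prompt
-- ===== SOURCE A (Python) =====
-- def is_code_prompt(problem: str):
--     keywords = [
--         "python", "function", "code", "algorithm",
--         "debug", "bug", "error", "leetcode",
--         "implement", "write a program"
--     ]
--
--     text = problem.lower()
--
--     return any(word in text for word in keywords)
-- ===== SOURCE B (Python) =====
-- KEYWORDS = [
--     "python", "function", "code", "algorithm",
--     "debug", "bug", "error", "leetcode",
--     "implement", "write a program"
-- ]
--
--
-- def is_code_prompt(problem: str):
--     # Single left-to-right scan over the text: at each position, check whether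
--     # any keyword starts there, instead of one full substring scan per keyword.
--     text = problem.lower()
--     for i in range(len(text) + 1):
--         for w in KEYWORDS:
--             if text.startswith(w, i):
--                 return True
--     return False
-- ===== Notes on version B (the rewrite author's own statement) =====
-- stated objective: alternative
-- what changed: Replaces ten independent per-keyword substring scans of the lowered text with a single position-by-position scan that tests at each index whether any keyword starts there, early-exiting on the first hit.
import Mathlib
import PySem

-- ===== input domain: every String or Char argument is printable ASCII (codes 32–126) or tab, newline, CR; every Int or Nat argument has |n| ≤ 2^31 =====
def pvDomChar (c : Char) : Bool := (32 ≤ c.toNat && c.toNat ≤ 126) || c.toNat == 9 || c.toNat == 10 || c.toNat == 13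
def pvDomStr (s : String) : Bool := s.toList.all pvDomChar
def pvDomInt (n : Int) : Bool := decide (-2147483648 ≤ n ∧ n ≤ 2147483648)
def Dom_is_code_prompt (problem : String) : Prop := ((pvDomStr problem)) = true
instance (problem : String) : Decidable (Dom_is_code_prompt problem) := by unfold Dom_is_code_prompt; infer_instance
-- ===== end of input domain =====

-- ===== PORT A =====
-- ten independent substring-membership tests, one per keyword
def is_code_prompt (problem : String) : Bool :=
  let keywords : List String :=
    ["python", "function", "code", "algorithm",
     "debug", "bug", "error", "leetcode",
     "implement", "write a program"]
  let text := PySem.Str.lower problem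
  keywords.any (fun word => PySem.Str.isIn word text)

-- ===== PORT B =====
-- one scan over text positions; text.startswith(w, i) = Chars.startswith (drop i) w, exact for 0 <= i <= len(text)
def is_code_prompt_alt (problem : String) : Bool :=
  let keywords : List (List Char) :=
    ["python".toList, "function".toList, "code".toList, "algorithm".toList,
     "debug".toList, "bug".toList, "error".toList, "leetcode".toList,
     "implement".toList, "write a program".toList]
  let text := PySem.Chars.lower problem.toList
  (PySem.List.pyRange 0 ((text.length : Int) + 1) 1).any (fun i =>
    keywords.any (fun w => PySem.Chars.startswith (text.drop i.toNat) w))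

-- ===== PRECONDITION & SPEC =====
def Spec_is_code_prompt (problem : String) (out : Bool) : Prop := out = is_code_prompt_alt problem
instance (problem : String) (out : Bool) : Decidable (Spec_is_code_prompt problem out) := by unfold Spec_is_code_prompt; infer_instance

-- ===== CLAIM (what is proved, stated in full; the proofs are below) =====
def Claim_equal_is_code_prompt : Prop := ∀ (problem : String), Dom_is_code_prompt problem → Spec_is_code_prompt problem (is_code_prompt problem)

-- ===== LEMMAS AND PROOFS =====
-- a position-scan over 0..len finds a keyword somewhere iff it is an infix
lemma anyScan_eq (tl : List Char) (kws : List (List Char)) :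
    ((PySem.List.pyRange 0 ((tl.length : Int) + 1) 1).any (fun i =>
      kws.any (fun w => PySem.Chars.startswith (tl.drop i.toNat) w)))
    = kws.any (fun w => PySem.Chars.isIn w tl) := by
  rw [Bool.eq_iff_iff]
  simp only [List.any_eq_true, PySem.List.mem_pyRange_one,
    PySem.Chars.startswith_iff, PySem.Chars.isIn_iff_infix]
  constructor
  · rintro ⟨i, ⟨h0, _⟩, w, hw, hpre⟩
    exact ⟨w, hw, (PySem.Chars.isIn_iff_infix w tl).mp
      ((PySem.Chars.exists_prefix_drop_iff_isIn w tl).mp ⟨i.toNat, hpre⟩)⟩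
  · rintro ⟨w, hw, hinf⟩
    obtain ⟨j, hpre⟩ := (PySem.Chars.exists_prefix_drop_iff_isIn w tl).mpr
      ((PySem.Chars.isIn_iff_infix w tl).mpr hinf)
    by_cases hj : j ≤ tl.length
    · exact ⟨(j : Int), ⟨by positivity, by omega⟩, w, hw, by simpa using hpre⟩
    · refine ⟨(tl.length : Int), ⟨by positivity, by omega⟩, w, hw, ?_⟩
      have hdrop : tl.drop j = tl.drop tl.length := by
        rw [List.drop_eq_nil_of_le (by omega), List.drop_eq_nil_of_le le_rfl]
      rw [hdrop] at hpre
      simpa [Int.toNat_natCast] using hpre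

-- ===== VERDICT (by name: the statement is the Claim_ definition above) =====
theorem is_code_prompt_spec : Claim_equal_is_code_prompt := by
  intro problem _
  unfold Spec_is_code_prompt is_code_prompt is_code_prompt_alt
  rw [anyScan_eq]
  simp [PySem.Str.isIn, PySem.Str.lower]
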